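-- pv_equiv track=rewrite | github.com/YooSeonHo/Algorithm | 프로그래머스/Lv.2/석유 시추.py | solution
-- ===== SOURCE A (Python) =====
-- from collections import deque
--
-- def bfs(land,visited,y,x,num) :
--     n = len(land)
--     m = len(land[0])
--
--     dy = [1,-1,0,0]
--     dx = [0,0,1,-1]
--     q = deque([])
--
--     q.append([y,x])
--     visited[y][x] = num
--     cnt  = 1
--
--     while q:
--         ty,tx = q.popleft()
--         for i in range(4):
--             ny = ty + dy[i]
--             nx = tx + dx[i]
--             if 0 <= ny < n and 0 <= nx < m :
--                 if not visited[ny][nx] and land[ny][nx] :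
--                     q.append([ny,nx])
--                     cnt += 1
--                     visited[ny][nx] = num
--     return cnt
--
-- def solution(land):
--     num = 1
--     n = len(land)
--     m = len(land[0])
--     visited = [[0] * m for _ in range(n)]
--     res = []
--     ans = 0
--
--     for i in range(n) :
--         for j in range(m) :
--             if land[i][j] and not visited[i][j] :
--                 res.append(bfs(land,visited,i,j,num))
--                 num += 1
--
--     for i in range(m) :
--         tmp = []
--         tmpAns = 0
--         for j in range(n) :
--             if visited[j][i] and visited[j][i] not in tmp :
--                 tmp.append(visited[j][i])
--
--         for t in tmp :
--             tmpAns += res[t-1]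
--         ans = max(ans,tmpAns)
--
--     return (ans)
-- ===== SOURCE B (Python) =====
-- def solution(land):
--     # Per-column multi-source flood fill: the sum of the sizes of the distinct
--     # components meeting column j equals the number of cells reachable from the
--     # oil cells of column j, so count that reachable set directly and take the max.
--     n = len(land)
--     m = len(land[0])
--     best = 0
--     for j in range(m):
--         reach = {(i, j) for i in range(n) if land[i][j]}
--         frontier = reach
--         while frontier:
--             frontier = {(y2, x2)
--                         for (y, x) in frontier
--                         for (y2, x2) in ((y + 1, x), (y - 1, x), (y, x + 1), (y, x - 1))
--                         if 0 <= y2 < n and 0 <= x2 < m and land[y2][x2]} - reach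
--             reach |= frontier
--         best = max(best, len(reach))
--     return best
-- ===== Notes on version B (the rewrite author's own statement) =====
-- stated objective: alternative
-- what changed: Instead of BFS-labelling every component, recording its size in a list, and de-duplicating labels per column, B flood-fills each column's oil cells jointly (multi-source frontier expansion of a set) and returns the max reachable-set cardinality, using that the sum of distinct component sizes meeting a column equals the size of the set reachable from that column's oil cells; no labels, sizes list or per-column membership scans.
import Mathlib
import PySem

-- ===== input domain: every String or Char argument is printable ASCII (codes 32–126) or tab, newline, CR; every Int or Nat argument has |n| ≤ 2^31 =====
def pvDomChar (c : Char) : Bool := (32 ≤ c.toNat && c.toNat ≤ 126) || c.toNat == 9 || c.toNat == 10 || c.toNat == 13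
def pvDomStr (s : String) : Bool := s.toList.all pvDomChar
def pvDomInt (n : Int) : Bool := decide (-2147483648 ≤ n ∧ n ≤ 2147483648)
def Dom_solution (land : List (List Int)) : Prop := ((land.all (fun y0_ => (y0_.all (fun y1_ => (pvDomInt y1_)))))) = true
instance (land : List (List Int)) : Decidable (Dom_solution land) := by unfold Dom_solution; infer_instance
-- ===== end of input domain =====

-- B replaces the BFS component labelling + per-column label de-duplication by a per-column
-- multi-source flood fill (fixpoint expansion of a set) counting the reachable cells; an
-- `alternative` decomposition, not claimed faster. Return-value equivalence only (A mutates
-- only its own local `visited`).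

-- ===== PORT A =====
-- matrix read/write helpers (Python's visited[i][j] read and assignment)
def vget (v : List (List Int)) (i j : Nat) : Int := (v.getD i []).getD j 0
def vset (v : List (List Int)) (i j : Nat) (x : Int) : List (List Int) :=
  v.set i ((v.getD i []).set j x)

def dyL : List Int := [1, -1, 0, 0]
def dxL : List Int := [0, 0, 1, -1]

-- body of `for i in range(4): …` inside the while-loop of bfs
def bfsStepDir (land : List (List Int)) (n m num ty tx : Int)
    (st : List (Int × Int) × List (List Int) × Int) (i : Nat) :
    List (Int × Int) × List (List Int) × Int :=
  let ny := ty + dyL.getD i 0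
  let nx := tx + dxL.getD i 0
  if 0 ≤ ny ∧ ny < n ∧ 0 ≤ nx ∧ nx < m then
    if vget st.2.1 ny.toNat nx.toNat = 0 ∧ (land.getD ny.toNat []).getD nx.toNat 0 ≠ 0 then
      (st.1 ++ [(ny, nx)], vset st.2.1 ny.toNat nx.toNat num, st.2.2 + 1)
    else st
  else st

-- the `while q:` loop of bfs; fuel-based recursion (the fuel passed below is proven sufficient)
def bfsGo (land : List (List Int)) (n m num : Int) :
    Nat → List (Int × Int) → List (List Int) → Int → List (List Int) × Int
  | 0, _, v, cnt => (v, cnt)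
  | fuel + 1, q, v, cnt =>
    match q with
    | [] => (v, cnt)
    | (ty, tx) :: qrest =>
      let st := (List.range 4).foldl (bfsStepDir land n m num ty tx) (qrest, v, cnt)
      bfsGo land n m num fuel st.1 st.2.1 st.2.2

-- bfs(land, visited, y, x, num): returns (mutated visited, cnt)
def bfsA (land visited : List (List Int)) (y x : Nat) (num : Int) :
    List (List Int) × Int :=
  bfsGo land (land.length : Int) ((land.getD 0 []).length : Int) num
    (2 * (land.length * (land.getD 0 []).length) + 1)
    [((y : Int), (x : Int))] (vset visited y x num) 1

-- body of the double seeding loop of solution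
def phase1Body (land : List (List Int)) (i j : Nat)
    (st : List (List Int) × List Int × Int) : List (List Int) × List Int × Int :=
  if (land.getD i []).getD j 0 ≠ 0 ∧ vget st.1 i j = 0 then
    let r := bfsA land st.1 i j st.2.2
    (r.1, st.2.1 ++ [r.2], st.2.2 + 1)
  else st

def solution (land : List (List Int)) : Int :=
  let n := land.length
  let m := (land.getD 0 []).length
  let v0 := List.replicate n (List.replicate m (0 : Int))
  let st := (List.range n).foldl (fun st i =>
      (List.range m).foldl (fun st j => phase1Body land i j st) st) (v0, ([] : List Int), 1)
  (List.range m).foldl (fun ans i =>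
    let tmp := (List.range n).foldl (fun tmp j =>
        if vget st.1 j i ≠ 0 ∧ ¬ (vget st.1 j i ∈ tmp) then tmp ++ [vget st.1 j i] else tmp)
      ([] : List Int)
    let tmpAns := tmp.foldl (fun a t => a + st.2.1.getD (t - 1).toNat 0) 0
    max ans tmpAns) 0

-- ===== PORT B =====
-- the four grid neighbours of a cell
def nbrsF (c : Int × Int) : Finset (Int × Int) :=
  {(c.1 + 1, c.2), (c.1 - 1, c.2), (c.1, c.2 + 1), (c.1, c.2 - 1)}

-- `0 <= y2 < n and 0 <= x2 < m and land[y2][x2]`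
def goodB (land : List (List Int)) (n m : Int) (d : Int × Int) : Bool :=
  decide (0 ≤ d.1 ∧ d.1 < n ∧ 0 ≤ d.2 ∧ d.2 < m) &&
  decide ((land.getD d.1.toNat []).getD d.2.toNat 0 ≠ 0)

-- the in-range oil neighbours of the frontier set
def expandB (land : List (List Int)) (n m : Int) (F : Finset (Int × Int)) :
    Finset (Int × Int) :=
  F.biUnion (fun c => (nbrsF c).filter (fun d => goodB land n m d))

-- the `while frontier:` loop; fuel is proven sufficient below
def floop (land : List (List Int)) (n m : Int) :
    Nat → Finset (Int × Int) → Finset (Int × Int) → Finset (Int × Int)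
  | 0, R, _ => R
  | f + 1, R, F =>
    if F = ∅ then R
    else
      let N := expandB land n m F \ R
      floop land n m f (R ∪ N) N

-- `{(i, j) for i in range(n) if land[i][j]}`
def colSeeds (land : List (List Int)) (j : Nat) : Finset (Int × Int) :=
  ((Finset.range land.length).filter (fun i => (land.getD i []).getD j 0 ≠ 0)).image
    (fun i : Nat => ((i : Int), (j : Int)))

def solution_alt (land : List (List Int)) : Int :=
  let n : Int := land.length
  let m : Int := (land.getD 0 []).length
  (List.range (land.getD 0 []).length).foldl (fun best j =>
    max best ((floop land n m (land.length * (land.getD 0 []).length + 2)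
      (colSeeds land j) (colSeeds land j)).card : Int))
    0

-- ===== PRECONDITION & SPEC =====
-- Pre_ excludes exactly the inputs where the Python A raises IndexError: empty `land`
-- (len(land[0])) and grids whose first row is longer than some later row (land[i][j] read).
def Pre_solution (land : List (List Int)) : Prop :=
  land ≠ [] ∧ ∀ row ∈ land, land.headI.length ≤ row.length
instance (land : List (List Int)) : Decidable (Pre_solution land) := by
  unfold Pre_solution; infer_instance

def pvWitness_solution : List (List Int) := [[1, 0, 1], [1, 0, 1]]

def Spec_solution (land : List (List Int)) (out : Int) : Prop := out = solution_alt land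
instance (land : List (List Int)) (out : Int) : Decidable (Spec_solution land out) := by
  unfold Spec_solution; infer_instance

-- ===== CLAIM (what is proved, stated in full; the proofs are below) =====
def Claim_equal_solution : Prop :=
  ∀ (land : List (List Int)), Dom_solution land → Pre_solution land →
    Spec_solution land (solution land)

-- ===== LEMMAS AND PROOFS =====


-- ---------- closure (flood-fill fixpoint) theory ----------
def cellsF (n m : Int) : Finset (Int × Int) :=
  ((Finset.range n.toNat).image (fun i : Nat => (i : Int))) ×ˢ
    ((Finset.range m.toNat).image (fun j : Nat => (j : Int)))

def growB (land : List (List Int)) (n m : Int) (S : Finset (Int × Int)) : Finset (Int × Int) :=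
  S ∪ expandB land n m S

def ClosedB (land : List (List Int)) (n m : Int) (S : Finset (Int × Int)) : Prop :=
  ∀ c ∈ S, ∀ d ∈ nbrsF c, goodB land n m d = true → d ∈ S

def ClB (land : List (List Int)) (n m : Int) (S : Finset (Int × Int)) : Finset (Int × Int) :=
  (growB land n m)^[n.toNat * m.toNat] S

lemma mem_cellsF (n m : Int) (c : Int × Int) :
    c ∈ cellsF n m ↔ 0 ≤ c.1 ∧ c.1 < n ∧ 0 ≤ c.2 ∧ c.2 < m := by
  simp only [cellsF, Finset.mem_product, Finset.mem_image, Finset.mem_range]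
  constructor
  · rintro ⟨⟨i, hi, hie⟩, ⟨j, hj, hje⟩⟩
    refine ⟨by omega, by omega, by omega, by omega⟩
  · rintro ⟨h1, h2, h3, h4⟩
    exact ⟨⟨c.1.toNat, by omega, by omega⟩, ⟨c.2.toNat, by omega, by omega⟩⟩

lemma card_cellsF (n m : Int) : (cellsF n m).card = n.toNat * m.toNat := by
  have hn : ∀ N : Nat, ((Finset.range N).image (fun i : Nat => (i : Int))).card = N := by
    intro N
    rw [Finset.card_image_of_injective _ (fun a b h => by omega)]
    exact Finset.card_range N
  rw [cellsF, Finset.card_product, hn, hn]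

lemma mem_nbrsF (c d : Int × Int) :
    d ∈ nbrsF c ↔ d = (c.1 + 1, c.2) ∨ d = (c.1 - 1, c.2) ∨ d = (c.1, c.2 + 1) ∨ d = (c.1, c.2 - 1) := by
  simp [nbrsF]

lemma nbrsF_symm {c d : Int × Int} (h : d ∈ nbrsF c) : c ∈ nbrsF d := by
  obtain ⟨c1, c2⟩ := c; obtain ⟨d1, d2⟩ := d
  simp [mem_nbrsF, Prod.ext_iff] at h ⊢
  omega

lemma good_mem_cells {land : List (List Int)} {n m : Int} {d : Int × Int}
    (h : goodB land n m d = true) : d ∈ cellsF n m := by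
  simp [goodB] at h
  simp [mem_cellsF]
  omega

lemma subset_growB (land : List (List Int)) (n m : Int) (S : Finset (Int × Int)) :
    S ⊆ growB land n m S := Finset.subset_union_left

lemma mem_growB {land : List (List Int)} {n m : Int} {S : Finset (Int × Int)} {a : Int × Int} :
    a ∈ growB land n m S ↔ a ∈ S ∨ ∃ c ∈ S, a ∈ nbrsF c ∧ goodB land n m a = true := by
  simp [growB, expandB, Finset.mem_union, Finset.mem_biUnion, Finset.mem_filter]

lemma closed_of_grow_eq {land : List (List Int)} {n m : Int} {S : Finset (Int × Int)}
    (h : growB land n m S = S) : ClosedB land n m S := by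
  intro c hc d hd hg
  rw [← h]
  exact mem_growB.2 (Or.inr ⟨c, hc, hd, hg⟩)

lemma growB_subset_cells {land : List (List Int)} {n m : Int} {S : Finset (Int × Int)}
    (hS : S ⊆ cellsF n m) : growB land n m S ⊆ cellsF n m := by
  intro a ha
  rcases mem_growB.1 ha with ha | ⟨c, _, _, hg⟩
  · exact hS ha
  · exact good_mem_cells hg

lemma iter_subset_cells {land : List (List Int)} {n m : Int} {S : Finset (Int × Int)}
    (hS : S ⊆ cellsF n m) (k : Nat) : (growB land n m)^[k] S ⊆ cellsF n m := by
  induction k with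
  | zero => exact hS
  | succ k ih => rw [Function.iterate_succ_apply']; exact growB_subset_cells ih

lemma subset_iter (land : List (List Int)) (n m : Int) (S : Finset (Int × Int)) (k : Nat) :
    S ⊆ (growB land n m)^[k] S := by
  induction k with
  | zero => exact fun a ha => ha
  | succ k ih =>
    rw [Function.iterate_succ_apply']
    exact fun a ha => subset_growB land n m _ (ih ha)

lemma subset_cl (land : List (List Int)) (n m : Int) (S : Finset (Int × Int)) :
    S ⊆ ClB land n m S := subset_iter land n m S _

lemma grow_fix_iter {land : List (List Int)} {n m : Int} {S : Finset (Int × Int)}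
    (h : growB land n m S = S) (k : Nat) : (growB land n m)^[k] S = S := by
  induction k with
  | zero => rfl
  | succ k ih => rw [Function.iterate_succ_apply', ih, h]

lemma card_iter_ge {land : List (List Int)} {n m : Int} {S : Finset (Int × Int)} :
    ∀ K : Nat, (∀ k < K, growB land n m ((growB land n m)^[k] S) ≠ (growB land n m)^[k] S) →
      S.card + K ≤ ((growB land n m)^[K] S).card := by
  intro K
  induction K with
  | zero => simp
  | succ K ih =>
    intro h
    have h1 := ih (fun k hk => h k (Nat.lt_succ_of_lt hk))
    have h2 : ((growB land n m)^[K] S) ⊂ growB land n m ((growB land n m)^[K] S) :=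
      Finset.ssubset_iff_subset_ne.2 ⟨subset_growB _ _ _ _, (h K (Nat.lt_succ_self K)).symm⟩
    have h3 := Finset.card_lt_card h2
    rw [Function.iterate_succ_apply']
    omega

lemma cl_closed {land : List (List Int)} {n m : Int} {S : Finset (Int × Int)}
    (hS : S ⊆ cellsF n m) : growB land n m (ClB land n m S) = ClB land n m S := by
  by_contra h
  set N := n.toNat * m.toNat with hN
  have hall : ∀ k < N + 1, growB land n m ((growB land n m)^[k] S) ≠ (growB land n m)^[k] S := by
    intro k hk heq
    have hfix : ∀ j : Nat, (growB land n m)^[k + j] S = (growB land n m)^[k] S := by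
      intro j
      rw [Nat.add_comm, Function.iterate_add_apply]
      exact grow_fix_iter heq j
    have hkN : (growB land n m)^[N] S = (growB land n m)^[k] S := by
      have := hfix (N - k); rwa [Nat.add_sub_cancel' (Nat.le_of_lt_succ hk)] at this
    exact h (by unfold ClB; rw [hkN, heq, ← hkN])
  have h1 := card_iter_ge (land := land) (n := n) (m := m) (S := S) (N + 1) hall
  have h2 : ((growB land n m)^[N + 1] S).card ≤ N := by
    have := Finset.card_le_card (iter_subset_cells (land := land) hS (N + 1))
    rwa [card_cellsF] at this
  omega

lemma cl_min {land : List (List Int)} {n m : Int} {S U : Finset (Int × Int)}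
    (hSU : S ⊆ U) (hU : ClosedB land n m U) : ClB land n m S ⊆ U := by
  have : ∀ k : Nat, (growB land n m)^[k] S ⊆ U := by
    intro k
    induction k with
    | zero => exact hSU
    | succ k ih =>
      rw [Function.iterate_succ_apply']
      intro a ha
      rcases mem_growB.1 ha with ha | ⟨c, hc, hn, hg⟩
      · exact ih ha
      · exact hU c (ih hc) a hn hg
  exact this _

lemma iter_subset_good {land : List (List Int)} {n m : Int} {S : Finset (Int × Int)}
    (hS : ∀ a ∈ S, goodB land n m a = true) (k : Nat) :
    ∀ a ∈ (growB land n m)^[k] S, goodB land n m a = true := by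
  induction k with
  | zero => exact hS
  | succ k ih =>
    rw [Function.iterate_succ_apply']
    intro a ha
    rcases mem_growB.1 ha with ha | ⟨c, _, _, hg⟩
    · exact ih a ha
    · exact hg

lemma cl_subset_good {land : List (List Int)} {n m : Int} {S : Finset (Int × Int)}
    (hS : ∀ a ∈ S, goodB land n m a = true) :
    ∀ a ∈ ClB land n m S, goodB land n m a = true := iter_subset_good hS _

lemma cl_closed' {land : List (List Int)} {n m : Int} {S : Finset (Int × Int)}
    (hS : S ⊆ cellsF n m) : ClosedB land n m (ClB land n m S) :=
  closed_of_grow_eq (cl_closed hS)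

lemma mem_cl_symm {land : List (List Int)} {n m : Int} {s d : Int × Int}
    (hs : goodB land n m s = true) (hd : d ∈ ClB land n m {s}) : s ∈ ClB land n m {d} := by
  have hsub : ({s} : Finset (Int × Int)) ⊆ cellsF n m := by
    simp [Finset.singleton_subset_iff]; exact good_mem_cells hs
  have hgood : ∀ a ∈ ({s} : Finset (Int × Int)), goodB land n m a = true := by
    simp [hs]
  have main : ∀ k : Nat, ∀ d ∈ (growB land n m)^[k] ({s} : Finset (Int × Int)),
      s ∈ ClB land n m {d} := by
    intro k
    induction k with
    | zero =>
      intro d hd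
      simp at hd
      subst hd
      exact subset_cl land n m {d} (Finset.mem_singleton_self d)
    | succ k ih =>
      intro d hd
      rw [Function.iterate_succ_apply'] at hd
      rcases mem_growB.1 hd with hd | ⟨c, hc, hn, hg⟩
      · exact ih d hd
      · have hsc := ih c hc
        have hgc : goodB land n m c = true := iter_subset_good hgood k c hc
        have hdsub : ({d} : Finset (Int × Int)) ⊆ cellsF n m := by
          simp [Finset.singleton_subset_iff]; exact good_mem_cells hg
        have hcd : c ∈ ClB land n m {d} :=
          cl_closed' hdsub d (subset_cl land n m {d} (Finset.mem_singleton_self d)) c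
            (nbrsF_symm hn) hgc
        have : ClB land n m {c} ⊆ ClB land n m {d} :=
          cl_min (Finset.singleton_subset_iff.2 hcd) (cl_closed' hdsub)
        exact this hsc
  exact main _ d hd

lemma cl_singleton_eq {land : List (List Int)} {n m : Int} {s c : Int × Int}
    (hs : goodB land n m s = true) (hc : c ∈ ClB land n m {s}) :
    ClB land n m {c} = ClB land n m {s} := by
  have hssub : ({s} : Finset (Int × Int)) ⊆ cellsF n m := by
    simp [Finset.singleton_subset_iff]; exact good_mem_cells hs
  have hgc : goodB land n m c = true := cl_subset_good (by simp [hs]) c hc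
  have hcsub : ({c} : Finset (Int × Int)) ⊆ cellsF n m := by
    simp [Finset.singleton_subset_iff]; exact good_mem_cells hgc
  apply Finset.Subset.antisymm
  · exact cl_min (Finset.singleton_subset_iff.2 hc) (cl_closed' hssub)
  · exact cl_min (Finset.singleton_subset_iff.2 (mem_cl_symm hs hc)) (cl_closed' hcsub)

lemma mem_expandB {land : List (List Int)} {n m : Int} {F : Finset (Int × Int)}
    {a : Int × Int} :
    a ∈ expandB land n m F ↔ ∃ c ∈ F, a ∈ nbrsF c ∧ goodB land n m a = true := by
  simp [expandB, Finset.mem_biUnion, Finset.mem_filter]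

lemma floop_spec (land : List (List Int)) (n m : Int) (S0 : Finset (Int × Int))
    (hS0 : S0 ⊆ cellsF n m) :
    ∀ (fuel : Nat) (R F : Finset (Int × Int)),
      S0 ⊆ R → F ⊆ R → R ⊆ ClB land n m S0 →
      (∀ c ∈ R, c ∉ F → ∀ d ∈ nbrsF c, goodB land n m d = true → d ∈ R) →
      (ClB land n m S0 \ R).card + 2 ≤ fuel →
      floop land n m fuel R F = ClB land n m S0 := by
  intro fuel
  induction fuel with
  | zero =>
    intro R F _ _ _ _ hfuel
    omega
  | succ f ih =>
    intro R F hSR hFR hRcl hfront hfuel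
    by_cases hF : F = ∅
    · subst hF
      rw [floop, if_pos rfl]
      have hclosed : ClosedB land n m R := fun c hc d hd hg =>
        hfront c hc (Finset.notMem_empty c) d hd hg
      exact Finset.Subset.antisymm hRcl (cl_min hSR hclosed)
    · rw [floop, if_neg hF]
      have hNcl : expandB land n m F \ R ⊆ ClB land n m S0 := by
        intro a ha
        obtain ⟨c, hcF, hn, hg⟩ := mem_expandB.1 (Finset.mem_sdiff.1 ha).1
        exact cl_closed' hS0 c (hRcl (hFR hcF)) a hn hg
      have hfront' : ∀ c ∈ R ∪ (expandB land n m F \ R),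
          c ∉ expandB land n m F \ R → ∀ d ∈ nbrsF c,
          goodB land n m d = true → d ∈ R ∪ (expandB land n m F \ R) := by
        intro c hc hcN d hd hg
        rcases Finset.mem_union.1 hc with hcR | hcN'
        · by_cases hcF : c ∈ F
          · have hdE : d ∈ expandB land n m F := mem_expandB.2 ⟨c, hcF, hd, hg⟩
            by_cases hdR : d ∈ R
            · exact Finset.mem_union_left _ hdR
            · exact Finset.mem_union_right _ (Finset.mem_sdiff.2 ⟨hdE, hdR⟩)
          · exact Finset.mem_union_left _ (hfront c hcR hcF d hd hg)
        · exact absurd hcN' hcN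
      by_cases hN : expandB land n m F \ R = ∅
      · rw [hN]
        have hclosed : ClosedB land n m R := by
          intro c hc d hd hg
          by_cases hcF : c ∈ F
          · have hdE : d ∈ expandB land n m F := mem_expandB.2 ⟨c, hcF, hd, hg⟩
            by_contra hdR
            exact Finset.notMem_empty d (hN ▸ Finset.mem_sdiff.2 ⟨hdE, hdR⟩)
          · exact hfront c hc hcF d hd hg
        have hRK : R = ClB land n m S0 :=
          Finset.Subset.antisymm hRcl (cl_min hSR hclosed)
        obtain ⟨f', rfl⟩ : ∃ f', f = f' + 1 := ⟨f - 1, by omega⟩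
        show floop land n m (f' + 1) (R ∪ (∅ : Finset (Int × Int)))
          (∅ : Finset (Int × Int)) = ClB land n m S0
        rw [Finset.union_empty, floop, if_pos rfl]
        exact hRK
      · have hNsub : expandB land n m F \ R ⊆ ClB land n m S0 \ R := by
          intro a ha
          exact Finset.mem_sdiff.2 ⟨hNcl ha, (Finset.mem_sdiff.1 ha).2⟩
        have hcard : (ClB land n m S0 \ (R ∪ (expandB land n m F \ R))).card + 1 ≤
            (ClB land n m S0 \ R).card := by
          have he : ClB land n m S0 \ (R ∪ (expandB land n m F \ R)) =
              (ClB land n m S0 \ R) \ (expandB land n m F \ R) := by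
            ext a
            simp only [Finset.mem_sdiff, Finset.mem_union]
            tauto
          rw [he, Finset.card_sdiff_of_subset hNsub]
          have hpos : 0 < (expandB land n m F \ R).card :=
            Finset.card_pos.2 (Finset.nonempty_iff_ne_empty.2 hN)
          have hle : (expandB land n m F \ R).card ≤ (ClB land n m S0 \ R).card :=
            Finset.card_le_card hNsub
          omega
        exact ih (R ∪ (expandB land n m F \ R)) (expandB land n m F \ R)
          (hSR.trans Finset.subset_union_left) Finset.subset_union_right
          (Finset.union_subset hRcl hNcl) hfront' (by omega)

-- ---------- visited-matrix helpers ----------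
def Shape (n m : Int) (v : List (List Int)) : Prop :=
  v.length = n.toNat ∧ ∀ k < n.toNat, (v.getD k []).length = m.toNat

def markv (v : List (List Int)) (c : Int × Int) : Int := vget v c.1.toNat c.2.toNat

def MsetV (n m : Int) (v : List (List Int)) (num : Int) : Finset (Int × Int) :=
  (cellsF n m).filter (fun c => markv v c = num)

lemma markv_cast (v : List (List Int)) (a b : Nat) :
    markv v ((a : Int), (b : Int)) = vget v a b := by
  simp [markv, vget]

lemma mem_MsetV {n m : Int} {v : List (List Int)} {num : Int} {c : Int × Int} :
    c ∈ MsetV n m v num ↔ c ∈ cellsF n m ∧ markv v c = num := by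
  simp [MsetV, Finset.mem_filter]

lemma getD_set_self {α : Type} [Inhabited α] (l : List α) (i : Nat) (x d : α)
    (h : i < l.length) : (l.set i x).getD i d = x := by
  rw [List.getD, List.getElem?_set_self (by omega)]
  rfl

lemma getD_set_ne {α : Type} [Inhabited α] (l : List α) (i i' : Nat) (x d : α)
    (h : i' ≠ i) : (l.set i x).getD i' d = l.getD i' d := by
  rw [List.getD, List.getElem?_set_ne (by omega), List.getD]

lemma vget_vset_self {v : List (List Int)} {i j : Nat} {x : Int}
    (hi : i < v.length) (hj : j < (v.getD i []).length) :
    vget (vset v i j x) i j = x := by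
  rw [vget, vset, getD_set_self _ _ _ _ hi, getD_set_self _ _ _ _ hj]

lemma vget_vset_ne {v : List (List Int)} {i j i' j' : Nat} {x : Int}
    (h : i' ≠ i ∨ j' ≠ j) : vget (vset v i j x) i' j' = vget v i' j' := by
  rcases h with h | h
  · rw [vget, vset, getD_set_ne _ _ _ _ _ h, vget]
  · rw [vget, vset]
    by_cases hii : i' = i
    · subst hii
      by_cases hlen : i' < v.length
      · rw [getD_set_self _ _ _ _ hlen, getD_set_ne _ _ _ _ _ h, vget]
      · rw [List.set_eq_of_length_le (by omega), vget]
    · rw [getD_set_ne _ _ _ _ _ hii, vget]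

lemma shape_vset {n m : Int} {v : List (List Int)} {i j : Nat} {x : Int}
    (h : Shape n m v) : Shape n m (vset v i j x) := by
  obtain ⟨h1, h2⟩ := h
  constructor
  · rw [vset, List.length_set, h1]
  · intro k hk
    by_cases hki : k = i
    · subst hki
      by_cases hlen : k < v.length
      · rw [vset, getD_set_self _ _ _ _ hlen, List.length_set]
        exact h2 k hk
      · omega
    · rw [vset, getD_set_ne _ _ _ _ _ hki]
      exact h2 k hk

-- for c in range and d the written cell, both with nonneg coords and c ≠ d, the mark is unchanged
lemma markv_vset_ne {v : List (List Int)} {c : Int × Int} {ny nx : Int} {x : Int}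
    (hc1 : 0 ≤ c.1) (hc2 : 0 ≤ c.2) (hny : 0 ≤ ny) (hnx : 0 ≤ nx)
    (hne : c ≠ (ny, nx)) : markv (vset v ny.toNat nx.toNat x) c = markv v c := by
  rw [markv, markv]
  apply vget_vset_ne
  by_cases h1 : c.1 = ny
  · right
    have h2 : c.2 ≠ nx := by
      intro h2
      exact hne (Prod.ext h1 h2)
    omega
  · left
    omega

-- ---------- the BFS loop invariant ----------
structure BInv (land : List (List Int)) (n m num : Int) (K : Finset (Int × Int))
    (v0 : List (List Int)) (q : List (Int × Int)) (v : List (List Int)) (cnt : Int) : Prop where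
  shape : Shape n m v
  qmem : ∀ c ∈ q, c ∈ MsetV n m v num
  msub : MsetV n m v num ⊆ K
  clean : ∀ c ∈ K, markv v c = num ∨ markv v c = 0
  cnt_eq : cnt = ((MsetV n m v num).card : Int)
  untouched : ∀ a b : Nat, vget v a b = vget v0 a b ∨
    (((a : Int), (b : Int)) ∈ K ∧ vget v a b = num)

lemma dir_mem_nbrs (ty tx : Int) : ∀ i < 4,
    (ty + dyL.getD i 0, tx + dxL.getD i 0) ∈ nbrsF (ty, tx) := by
  intro i hi
  interval_cases i <;> simp [dyL, dxL, mem_nbrsF] <;> omega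

lemma nbrs_eq_dirs {ty tx : Int} {d : Int × Int} (h : d ∈ nbrsF (ty, tx)) :
    ∃ i < 4, d = (ty + dyL.getD i 0, tx + dxL.getD i 0) := by
  rw [mem_nbrsF] at h
  rcases h with h | h | h | h
  · exact ⟨0, by omega, by simpa [dyL, dxL] using h⟩
  · exact ⟨1, by omega, by simpa [dyL, dxL] using h⟩
  · exact ⟨2, by omega, by simpa [dyL, dxL] using h⟩
  · exact ⟨3, by omega, by simpa [dyL, dxL] using h⟩

lemma bfsStepDir_eval (land : List (List Int)) (n m num ty tx : Int)
    (q : List (Int × Int)) (v : List (List Int)) (cnt : Int) (i : Nat) :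
    bfsStepDir land n m num ty tx (q, v, cnt) i =
      (if 0 ≤ ty + dyL.getD i 0 ∧ ty + dyL.getD i 0 < n ∧
          0 ≤ tx + dxL.getD i 0 ∧ tx + dxL.getD i 0 < m then
        if vget v (ty + dyL.getD i 0).toNat (tx + dxL.getD i 0).toNat = 0 ∧
            (land.getD (ty + dyL.getD i 0).toNat []).getD (tx + dxL.getD i 0).toNat 0 ≠ 0 then
          (q ++ [(ty + dyL.getD i 0, tx + dxL.getD i 0)],
            vset v (ty + dyL.getD i 0).toNat (tx + dxL.getD i 0).toNat num, cnt + 1)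
        else (q, v, cnt)
      else (q, v, cnt)) := rfl

lemma stepDirs_spec (land : List (List Int)) (n m num : Int) (K : Finset (Int × Int))
    (v0 : List (List Int)) (ty tx : Int)
    (hK : growB land n m K = K) (hKc : K ⊆ cellsF n m) (hnum : num ≠ 0)
    (hc : (ty, tx) ∈ K) :
    ∀ (dirs : List Nat) (q : List (Int × Int)) (v : List (List Int)) (cnt : Int),
      (∀ i ∈ dirs, i < 4) → BInv land n m num K v0 q v cnt →
      ∃ q' v' cnt',
        dirs.foldl (bfsStepDir land n m num ty tx) (q, v, cnt) = (q', v', cnt') ∧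
        BInv land n m num K v0 q' v' cnt' ∧
        MsetV n m v num ⊆ MsetV n m v' num ∧
        (∀ c ∈ MsetV n m v' num, c ∈ MsetV n m v num ∨ c ∈ q') ∧
        (∀ c ∈ q, c ∈ q') ∧
        (∀ i ∈ dirs, goodB land n m (ty + dyL.getD i 0, tx + dxL.getD i 0) = true →
          (ty + dyL.getD i 0, tx + dxL.getD i 0) ∈ MsetV n m v' num) ∧
        2 * ((K \ MsetV n m v' num).card : Int) + q'.length ≤
          2 * ((K \ MsetV n m v num).card : Int) + q.length := by
  intro dirs
  induction dirs with
  | nil =>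
    intro q v cnt _ hinv
    exact ⟨q, v, cnt, rfl, hinv, Finset.Subset.refl _, fun c hc' => Or.inl hc',
      fun c h => h, by simp, le_refl _⟩
  | cons i is ih =>
    intro q v cnt hdirs hinv
    have hi4 : i < 4 := hdirs i (List.mem_cons_self)
    set ny := ty + dyL.getD i 0 with hny
    set nx := tx + dxL.getD i 0 with hnx
    have hdn : (ny, nx) ∈ nbrsF (ty, tx) := dir_mem_nbrs ty tx i hi4
    rw [List.foldl_cons]
    by_cases hrange : 0 ≤ ny ∧ ny < n ∧ 0 ≤ nx ∧ nx < m
    · by_cases hfresh : vget v ny.toNat nx.toNat = 0 ∧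
          (land.getD ny.toNat []).getD nx.toNat 0 ≠ 0
      · -- the push case
        rw [bfsStepDir_eval, if_pos hrange, if_pos hfresh]
        have hgd : goodB land n m (ny, nx) = true := by
          simp only [goodB]
          simp only [decide_eq_true_eq, Bool.and_eq_true]
          exact ⟨by exact hrange, hfresh.2⟩
        have hdK : (ny, nx) ∈ K := closed_of_grow_eq hK _ hc _ hdn hgd
        have hd_cells : (ny, nx) ∈ cellsF n m := good_mem_cells hgd
        have hlen1 : ny.toNat < v.length := by
          have := hinv.shape.1; omega
        have hlen2 : nx.toNat < (v.getD ny.toNat []).length := by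
          have := hinv.shape.2 ny.toNat (by have := hinv.shape.1; omega)
          omega
        have hmark_new : markv (vset v ny.toNat nx.toNat num) (ny, nx) = num := by
          rw [markv]
          exact vget_vset_self hlen1 hlen2
        have hmark_old : ∀ c : Int × Int, 0 ≤ c.1 → 0 ≤ c.2 → c ≠ (ny, nx) →
            markv (vset v ny.toNat nx.toNat num) c = markv v c := by
          intro c h1 h2 hne
          exact markv_vset_ne h1 h2 hrange.1 hrange.2.2.1 hne
        have hd_notM : (ny, nx) ∉ MsetV n m v num := by
          rw [mem_MsetV]
          rintro ⟨-, hmk⟩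
          rw [markv] at hmk
          rw [hfresh.1] at hmk
          exact hnum hmk.symm
        have hM' : MsetV n m (vset v ny.toNat nx.toNat num) num =
            insert (ny, nx) (MsetV n m v num) := by
          ext c
          rw [mem_MsetV, Finset.mem_insert, mem_MsetV]
          by_cases hcd : c = (ny, nx)
          · subst hcd
            simp [hd_cells, hmark_new]
          · have h1 : c ∈ cellsF n m → markv (vset v ny.toNat nx.toNat num) c = markv v c := by
              intro hcc
              rw [mem_cellsF] at hcc
              exact hmark_old c hcc.1 hcc.2.2.1 hcd
            constructor
            · rintro ⟨hcc, hmk⟩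
              exact Or.inr ⟨hcc, by rw [← h1 hcc]; exact hmk⟩
            · rintro (hcd' | ⟨hcc, hmk⟩)
              · exact absurd hcd' hcd
              · exact ⟨hcc, by rw [h1 hcc]; exact hmk⟩
        have hcard : (MsetV n m (vset v ny.toNat nx.toNat num) num).card =
            (MsetV n m v num).card + 1 := by
          rw [hM', Finset.card_insert_of_notMem hd_notM]
        have hinv' : BInv land n m num K v0 (q ++ [(ny, nx)])
            (vset v ny.toNat nx.toNat num) (cnt + 1) := by
          refine ⟨shape_vset hinv.shape, ?_, ?_, ?_, ?_, ?_⟩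
          · intro c hcq
            rw [hM']
            rcases List.mem_append.1 hcq with h | h
            · exact Finset.mem_insert_of_mem (hinv.qmem c h)
            · simp at h
              subst h
              exact Finset.mem_insert_self _ _
          · rw [hM']
            exact Finset.insert_subset hdK hinv.msub
          · intro c hcK
            by_cases hcd : c = (ny, nx)
            · subst hcd
              exact Or.inl hmark_new
            · have hcc := mem_cellsF n m c |>.1 (hKc hcK)
              rw [hmark_old c hcc.1 hcc.2.2.1 hcd]
              exact hinv.clean c hcK
          · rw [hcard, hinv.cnt_eq]
            push_cast
            ring
          · intro a b
            by_cases hab : a = ny.toNat ∧ b = nx.toNat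
            · right
              have hpr : ((a : Int), (b : Int)) = (ny, nx) := by
                rw [Prod.ext_iff]
                constructor <;> simp <;> omega
              rw [hpr]
              refine ⟨hdK, ?_⟩
              rw [hab.1, hab.2]
              exact vget_vset_self hlen1 hlen2
            · have : vget (vset v ny.toNat nx.toNat num) a b = vget v a b := by
                apply vget_vset_ne
                omega
              rw [this]
              exact hinv.untouched a b
        obtain ⟨q', v', cnt', heq, hinvf, hmono, hnew, hqsub, hdirsc, hmeas⟩ :=
          ih (q ++ [(ny, nx)]) (vset v ny.toNat nx.toNat num) (cnt + 1)
            (fun j hj => hdirs j (List.mem_cons_of_mem _ hj)) hinv'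
        refine ⟨q', v', cnt', heq, hinvf, ?_, ?_, ?_, ?_, ?_⟩
        · intro c hcM
          exact hmono (by rw [hM']; exact Finset.mem_insert_of_mem hcM)
        · intro c hcM
          rcases hnew c hcM with h | h
          · rw [hM'] at h
            rcases Finset.mem_insert.1 h with h | h
            · subst h
              exact Or.inr (hqsub _ (by simp))
            · exact Or.inl h
          · exact Or.inr h
        · intro c hcq
          exact hqsub c (List.mem_append_left _ hcq)
        · intro j hj hgj
          rcases List.mem_cons.1 hj with hj | hj
          · subst hj
            exact hmono (by rw [hM']; exact Finset.mem_insert_self _ _)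
          · exact hdirsc j hj hgj
        · have h1 : ((K \ MsetV n m (vset v ny.toNat nx.toNat num) num).card : Int) =
              ((K \ MsetV n m v num).card : Int) - 1 := by
            rw [hM']
            have : K \ insert (ny, nx) (MsetV n m v num) =
                (K \ MsetV n m v num).erase (ny, nx) := by
              ext c
              simp [Finset.mem_sdiff, Finset.mem_erase]
              tauto
            rw [this, Finset.card_erase_of_mem (Finset.mem_sdiff.2 ⟨hdK, hd_notM⟩)]
            have hpos : 0 < (K \ MsetV n m v num).card :=
              Finset.card_pos.2 ⟨(ny, nx), Finset.mem_sdiff.2 ⟨hdK, hd_notM⟩⟩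
            omega
          rw [h1] at hmeas
          simp only [List.length_append, List.length_cons, List.length_nil] at hmeas ⊢
          push_cast at hmeas ⊢
          omega
      · -- in range but not pushed
        rw [bfsStepDir_eval, if_pos hrange, if_neg hfresh]
        obtain ⟨q', v', cnt', heq, hinvf, hmono, hnew, hqsub, hdirsc, hmeas⟩ :=
          ih q v cnt (fun j hj => hdirs j (List.mem_cons_of_mem _ hj)) hinv
        refine ⟨q', v', cnt', heq, hinvf, hmono, hnew, hqsub, ?_, hmeas⟩
        intro j hj hgj
        rcases List.mem_cons.1 hj with hj | hj
        · subst hj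
          have hgd : goodB land n m (ny, nx) = true := hgj
          have hdK : (ny, nx) ∈ K := closed_of_grow_eq hK _ hc _ hdn hgd
          have hoil : (land.getD ny.toNat []).getD nx.toNat 0 ≠ 0 := by
            simp only [goodB, decide_eq_true_eq, Bool.and_eq_true] at hgd
            exact hgd.2
          have hmk : vget v ny.toNat nx.toNat ≠ 0 := by
            intro h0
            exact hfresh ⟨h0, hoil⟩
          have hmknum : markv v (ny, nx) = num := by
            rcases hinv.clean _ hdK with h | h
            · exact h
            · exact absurd h hmk
          exact hmono (mem_MsetV.2 ⟨good_mem_cells hgd, hmknum⟩)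
        · exact hdirsc j hj hgj
    · -- out of range: nothing happens and the direction is not good
      rw [bfsStepDir_eval, if_neg hrange]
      obtain ⟨q', v', cnt', heq, hinvf, hmono, hnew, hqsub, hdirsc, hmeas⟩ :=
        ih q v cnt (fun j hj => hdirs j (List.mem_cons_of_mem _ hj)) hinv
      refine ⟨q', v', cnt', heq, hinvf, hmono, hnew, hqsub, ?_, hmeas⟩
      intro j hj hgj
      rcases List.mem_cons.1 hj with hj | hj
      · subst hj
        exfalso
        simp only [goodB, decide_eq_true_eq, Bool.and_eq_true] at hgj
        exact hrange hgj.1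
      · exact hdirsc j hj hgj

lemma bfsGo_spec (land : List (List Int)) (n m num : Int) (K : Finset (Int × Int))
    (v0 : List (List Int)) (seed : Int × Int)
    (hK : growB land n m K = K) (hKc : K ⊆ cellsF n m) (hnum : num ≠ 0)
    (hmin : ∀ U, seed ∈ U → ClosedB land n m U → K ⊆ U) :
    ∀ (fuel : Nat) (q : List (Int × Int)) (v : List (List Int)) (cnt : Int),
      2 * ((K \ MsetV n m v num).card : Int) + q.length ≤ fuel →
      BInv land n m num K v0 q v cnt →
      seed ∈ MsetV n m v num →
      (∀ c ∈ MsetV n m v num, c ∉ q → ∀ d ∈ nbrsF c, goodB land n m d = true →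
        d ∈ MsetV n m v num) →
      ∃ v', bfsGo land n m num fuel q v cnt = (v', (K.card : Int)) ∧
        Shape n m v' ∧
        (∀ a b : Nat, vget v' a b =
          if ((a : Int), (b : Int)) ∈ K then num else vget v0 a b) := by
  have terminal : ∀ (v : List (List Int)) (cnt : Int),
      BInv land n m num K v0 [] v cnt →
      seed ∈ MsetV n m v num →
      (∀ c ∈ MsetV n m v num, c ∉ ([] : List (Int × Int)) → ∀ d ∈ nbrsF c,
        goodB land n m d = true → d ∈ MsetV n m v num) →
      cnt = (K.card : Int) ∧ Shape n m v ∧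
        (∀ a b : Nat, vget v a b =
          if ((a : Int), (b : Int)) ∈ K then num else vget v0 a b) := by
    intro v cnt hinv hseed hfront
    have hclosed : ClosedB land n m (MsetV n m v num) := by
      intro c hc d hd hg
      exact hfront c hc (by simp) d hd hg
    have hKM : K = MsetV n m v num :=
      Finset.Subset.antisymm (hmin _ hseed hclosed) hinv.msub
    refine ⟨by rw [hinv.cnt_eq, hKM], hinv.shape, ?_⟩
    intro a b
    by_cases hab : ((a : Int), (b : Int)) ∈ K
    · rw [if_pos hab]
      have : ((a : Int), (b : Int)) ∈ MsetV n m v num := by rw [← hKM]; exact hab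
      have := (mem_MsetV.1 this).2
      rwa [markv_cast] at this
    · rw [if_neg hab]
      rcases hinv.untouched a b with h | ⟨h, -⟩
      · exact h
      · exact absurd h hab
  intro fuel
  induction fuel with
  | zero =>
    intro q v cnt hfuel hinv hseed hfront
    have hq : q = [] := by
      cases q with
      | nil => rfl
      | cons c qr =>
        exfalso
        have h1 : (0 : Int) ≤ 2 * ((K \ MsetV n m v num).card : Int) := by positivity
        simp only [List.length_cons] at hfuel
        push_cast at hfuel
        omega
    subst hq
    obtain ⟨h1, h2, h3⟩ := terminal v cnt hinv hseed hfront
    exact ⟨v, by rw [bfsGo, h1], h2, h3⟩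
  | succ fuel ih =>
    intro q v cnt hfuel hinv hseed hfront
    cases q with
    | nil =>
      obtain ⟨h1, h2, h3⟩ := terminal v cnt hinv hseed hfront
      exact ⟨v, by rw [bfsGo, h1], h2, h3⟩
    | cons c qrest =>
      obtain ⟨ty, tx⟩ := c
      have hcK : (ty, tx) ∈ K := hinv.msub (hinv.qmem _ List.mem_cons_self)
      have hcM : (ty, tx) ∈ MsetV n m v num := hinv.qmem _ List.mem_cons_self
      have hinv_rest : BInv land n m num K v0 qrest v cnt :=
        ⟨hinv.shape, fun c h => hinv.qmem c (List.mem_cons_of_mem _ h), hinv.msub,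
          hinv.clean, hinv.cnt_eq, hinv.untouched⟩
      obtain ⟨q', v', cnt', heq, hinvf, hmono, hnew, hqsub, hdirsc, hmeas⟩ :=
        stepDirs_spec land n m num K v0 ty tx hK hKc hnum hcK (List.range 4)
          qrest v cnt (fun i hi => List.mem_range.1 hi) hinv_rest
      have hstep : bfsGo land n m num (fuel + 1) ((ty, tx) :: qrest) v cnt =
          bfsGo land n m num fuel q' v' cnt' := by
        show bfsGo land n m num fuel
          ((List.range 4).foldl (bfsStepDir land n m num ty tx) (qrest, v, cnt)).1
          ((List.range 4).foldl (bfsStepDir land n m num ty tx) (qrest, v, cnt)).2.1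
          ((List.range 4).foldl (bfsStepDir land n m num ty tx) (qrest, v, cnt)).2.2 = _
        rw [heq]
      have hfront' : ∀ c ∈ MsetV n m v' num, c ∉ q' → ∀ d ∈ nbrsF c,
          goodB land n m d = true → d ∈ MsetV n m v' num := by
        intro c hcM' hcq' d hd hg
        rcases hnew c hcM' with hcM0 | hcq
        · by_cases hch : c = (ty, tx)
          · subst hch
            obtain ⟨i, hi4, hdi⟩ := nbrs_eq_dirs hd
            subst hdi
            exact hdirsc i (List.mem_range.2 hi4) hg
          · have hcq0 : c ∉ qrest := fun h => hcq' (hqsub c h)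
            exact hmono (hfront c hcM0 (by simp [hch, hcq0]) d hd hg)
        · exact absurd hcq hcq'
      have hfuel' : 2 * ((K \ MsetV n m v' num).card : Int) + q'.length ≤ fuel := by
        simp only [List.length_cons] at hfuel
        push_cast at hfuel hmeas ⊢
        omega
      obtain ⟨v'', he, hs, hp⟩ := ih q' v' cnt' hfuel' hinvf (hmono hseed) hfront'
      exact ⟨v'', by rw [hstep, he], hs, hp⟩

lemma bfsA_spec (land : List (List Int)) (v : List (List Int)) (y x : Nat) (num : Int)
    (hsh : Shape (land.length : Int) ((land.getD 0 []).length : Int) v)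
    (hnum : 1 ≤ num)
    (hgood : goodB land (land.length : Int) ((land.getD 0 []).length : Int)
      ((y : Int), (x : Int)) = true)
    (hbound : ∀ c ∈ cellsF (land.length : Int) ((land.getD 0 []).length : Int),
      0 ≤ markv v c ∧ markv v c < num)
    (hKzero : ∀ c ∈ ClB land (land.length : Int) ((land.getD 0 []).length : Int)
      {((y : Int), (x : Int))}, markv v c = 0) :
    ∃ v', bfsA land v y x num =
        (v', ((ClB land (land.length : Int) ((land.getD 0 []).length : Int)
          {((y : Int), (x : Int))}).card : Int)) ∧
      Shape (land.length : Int) ((land.getD 0 []).length : Int) v' ∧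
      ∀ a b : Nat, vget v' a b =
        if ((a : Int), (b : Int)) ∈ ClB land (land.length : Int)
            ((land.getD 0 []).length : Int) {((y : Int), (x : Int))} then num
        else vget v a b := by
  set n : Int := (land.length : Int) with hn
  set m : Int := ((land.getD 0 []).length : Int) with hm
  set s : Int × Int := ((y : Int), (x : Int)) with hs
  set K : Finset (Int × Int) := ClB land n m {s} with hKdef
  have hscell : s ∈ cellsF n m := good_mem_cells hgood
  have hssub : ({s} : Finset (Int × Int)) ⊆ cellsF n m :=
    Finset.singleton_subset_iff.2 hscell
  have hK : growB land n m K = K := cl_closed hssub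
  have hKc : K ⊆ cellsF n m := iter_subset_cells hssub _
  have hmin : ∀ U, s ∈ U → ClosedB land n m U → K ⊆ U := fun U hU hC =>
    cl_min (Finset.singleton_subset_iff.2 hU) hC
  have hnum' : num ≠ 0 := by omega
  have hylt : y < land.length := by
    rw [mem_cellsF] at hscell
    simp only [hs] at hscell
    omega
  have hxlt : x < (land.getD 0 []).length := by
    rw [mem_cellsF] at hscell
    simp only [hs] at hscell
    omega
  have hlen1 : y < v.length := by rw [hsh.1]; omega
  have hlen2 : x < (v.getD y []).length := by rw [hsh.2 y (by omega)]; omega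
  have hvset_eq : vset v y x num = vset v ((y : Int)).toNat ((x : Int)).toNat num := by
    simp
  have hmark1 : markv (vset v y x num) s = num := by
    rw [hs, markv_cast]
    exact vget_vset_self hlen1 hlen2
  have hmark_old : ∀ c : Int × Int, c ∈ cellsF n m → c ≠ s →
      markv (vset v y x num) c = markv v c := by
    intro c hcc hne
    rw [mem_cellsF] at hcc
    rw [hvset_eq]
    exact markv_vset_ne hcc.1 hcc.2.2.1 (by omega) (by omega) (by rw [← hs]; exact hne)
  have hM1 : MsetV n m (vset v y x num) num = {s} := by
    ext c
    rw [mem_MsetV, Finset.mem_singleton]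
    constructor
    · rintro ⟨hcc, hmk⟩
      by_contra hne
      rw [hmark_old c hcc hne] at hmk
      have := hbound c hcc
      omega
    · rintro rfl
      exact ⟨hscell, hmark1⟩
  have hinv : BInv land n m num K v [s] (vset v y x num) 1 := by
    refine ⟨?_, ?_, ?_, ?_, ?_, ?_⟩
    · exact shape_vset hsh
    · intro c hc
      simp only [List.mem_singleton] at hc
      subst hc
      rw [hM1]
      exact Finset.mem_singleton_self s
    · rw [hM1]
      exact Finset.singleton_subset_iff.2 (subset_cl land n m {s} (Finset.mem_singleton_self s))
    · intro c hcK
      by_cases hcs : c = s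
      · subst hcs; exact Or.inl hmark1
      · rw [hmark_old c (hKc hcK) hcs]
        exact Or.inr (hKzero c hcK)
    · rw [hM1]; simp
    · intro a b
      by_cases hab : a = y ∧ b = x
      · right
        obtain ⟨rfl, rfl⟩ := hab
        exact ⟨subset_cl land n m {s} (Finset.mem_singleton_self s),
          vget_vset_self hlen1 hlen2⟩
      · left
        apply vget_vset_ne
        omega
  have hfront : ∀ c ∈ MsetV n m (vset v y x num) num, c ∉ ([s] : List (Int × Int)) →
      ∀ d ∈ nbrsF c, goodB land n m d = true → d ∈ MsetV n m (vset v y x num) num := by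
    intro c hc hnc
    rw [hM1, Finset.mem_singleton] at hc
    exact absurd (by simp [hc]) hnc
  have hfuel : 2 * ((K \ MsetV n m (vset v y x num) num).card : Int) +
      ([s] : List (Int × Int)).length ≤
      (2 * (land.length * (land.getD 0 []).length) + 1 : Nat) := by
    have h1 : (K \ MsetV n m (vset v y x num) num).card ≤ K.card :=
      Finset.card_le_card (Finset.sdiff_subset)
    have h2 : K.card ≤ (cellsF n m).card := Finset.card_le_card hKc
    rw [card_cellsF] at h2
    have h5 : n.toNat * m.toNat = land.length * (land.getD 0 []).length := by
      rw [hn, hm]; simp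
    have h6 : (K \ MsetV n m (vset v y x num) num).card ≤
        land.length * (land.getD 0 []).length := by omega
    simp only [List.length_singleton]
    exact_mod_cast (by omega :
      2 * (K \ MsetV n m (vset v y x num) num).card + 1 ≤
        2 * (land.length * (land.getD 0 []).length) + 1)
  obtain ⟨v', he, hsf, hp⟩ := bfsGo_spec land n m num K v s hK hKc hnum' hmin
    (2 * (land.length * (land.getD 0 []).length) + 1) [s] (vset v y x num) 1
    hfuel hinv (by rw [hM1]; exact Finset.mem_singleton_self s) hfront
  exact ⟨v', he, hsf, hp⟩

-- ---------- phase 1 (seeding loop) invariant ----------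
def P1Inv (land : List (List Int)) (n m : Int)
    (st : List (List Int) × List Int × Int) : Prop :=
  Shape n m st.1 ∧ 1 ≤ st.2.2 ∧ st.2.1.length = (st.2.2 - 1).toNat ∧
  (∀ c ∈ cellsF n m, 0 ≤ markv st.1 c ∧ markv st.1 c < st.2.2) ∧
  (∀ k : Int, 1 ≤ k → k < st.2.2 → ∃ s, goodB land n m s = true ∧
    (∀ c, (c ∈ cellsF n m ∧ markv st.1 c = k) ↔ c ∈ ClB land n m {s}) ∧
    st.2.1.getD (k - 1).toNat 0 = ((ClB land n m {s}).card : Int))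

def ProgTo (land : List (List Int)) (n m : Int) (v : List (List Int)) (i j : Nat) : Prop :=
  ∀ c ∈ cellsF n m, goodB land n m c = true →
    (c.1 < (i : Int) ∨ (c.1 = (i : Int) ∧ c.2 < (j : Int))) → markv v c ≠ 0

lemma foldl_range_inv {α : Type} (f : α → Nat → α) (P : Nat → α → Prop) :
    ∀ (N : Nat) (a : α), P 0 a → (∀ k a', k < N → P k a' → P (k + 1) (f a' k)) →
      P N ((List.range N).foldl f a) := by
  intro N
  induction N with
  | zero => intro a h0 _; simpa using h0
  | succ N ihN =>
    intro a h0 hstep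
    rw [List.range_succ, List.foldl_append]
    simp only [List.foldl_cons, List.foldl_nil]
    exact hstep N _ (Nat.lt_succ_self N)
      (ihN a h0 (fun k a' hk => hstep k a' (Nat.lt_succ_of_lt hk)))

-- every cell of the component of an unmarked good seed is unmarked
lemma kzero_of_inv {land : List (List Int)} {n m : Int}
    {st : List (List Int) × List Int × Int} (hinv : P1Inv land n m st)
    {s : Int × Int} (hgood : goodB land n m s = true) (hmk : markv st.1 s = 0) :
    ∀ c ∈ ClB land n m {s}, markv st.1 c = 0 := by
  obtain ⟨hsh, hnum1, hlen, hbound, hcomp⟩ := hinv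
  intro c hc
  by_contra hne
  have hgc : goodB land n m c = true := cl_subset_good (by simp [hgood]) c hc
  have hcc : c ∈ cellsF n m := good_mem_cells hgc
  have hb := hbound c hcc
  obtain ⟨sk, hsk_good, hsk_fib, -⟩ :=
    hcomp (markv st.1 c) (by omega) hb.2
  have hck : c ∈ ClB land n m {sk} := (hsk_fib c).1 ⟨hcc, rfl⟩
  have e1 : ClB land n m {c} = ClB land n m {s} := cl_singleton_eq hgood hc
  have e2 : ClB land n m {c} = ClB land n m {sk} := cl_singleton_eq hsk_good hck
  have hs_in : s ∈ ClB land n m {sk} := by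
    rw [← e2, e1]
    exact subset_cl land n m {s} (Finset.mem_singleton_self s)
  have := ((hsk_fib s).2 hs_in).2
  rw [hmk] at this
  omega

lemma getD_append_left {α : Type} [Inhabited α] (l l' : List α) (i : Nat) (d : α)
    (h : i < l.length) : (l ++ l').getD i d = l.getD i d := by
  rw [List.getD, List.getElem?_append_left h, List.getD]

lemma getD_append_length {α : Type} [Inhabited α] (l : List α) (a d : α) :
    (l ++ [a]).getD l.length d = a := by
  rw [List.getD, List.getElem?_append_right (le_refl _)]
  simp

lemma phase1_step (land : List (List Int)) (i j : Nat)
    (st : List (List Int) × List Int × Int)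
    (hinv : P1Inv land (land.length : Int) ((land.getD 0 []).length : Int) st)
    (hprog : ProgTo land (land.length : Int) ((land.getD 0 []).length : Int) st.1 i j)
    (hi : i < land.length) (hj : j < (land.getD 0 []).length) :
    P1Inv land (land.length : Int) ((land.getD 0 []).length : Int)
      (phase1Body land i j st) ∧
    ProgTo land (land.length : Int) ((land.getD 0 []).length : Int)
      (phase1Body land i j st).1 i (j + 1) := by
  set n : Int := (land.length : Int) with hn
  set m : Int := ((land.getD 0 []).length : Int) with hm
  obtain ⟨v, res, num⟩ := st
  simp only at hprog
  by_cases hcond : (land.getD i []).getD j 0 ≠ 0 ∧ vget v i j = 0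
  · -- a new component is flooded
    set s : Int × Int := ((i : Int), (j : Int)) with hs
    have hoil : (land.getD ((i : Int)).toNat []).getD ((j : Int)).toNat 0 ≠ 0 := by
      simpa using hcond.1
    have hgood_s : goodB land n m s = true := by
      simp only [goodB, hs, decide_eq_true_eq, Bool.and_eq_true]
      exact ⟨⟨by omega, by omega, by omega, by omega⟩, hoil⟩
    have hmk0 : markv v s = 0 := by
      rw [hs, markv_cast]
      exact hcond.2
    obtain ⟨hsh, hnum1, hlen, hbound, hcomp⟩ := hinv
    simp only at hsh hlen hbound hcomp hnum1
    have hKzero : ∀ c ∈ ClB land n m {s}, markv v c = 0 :=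
      kzero_of_inv (st := (v, res, num)) ⟨hsh, hnum1, hlen, hbound, hcomp⟩ hgood_s hmk0
    obtain ⟨v', he, hsf, hp⟩ := bfsA_spec land v i j num hsh hnum1 hgood_s hbound hKzero
    set K : Finset (Int × Int) := ClB land n m {s} with hKdef
    have hKc : K ⊆ cellsF n m :=
      iter_subset_cells (Finset.singleton_subset_iff.2 (good_mem_cells hgood_s)) _
    have hbody : phase1Body land i j (v, res, num) =
        (v', res ++ [(K.card : Int)], num + 1) := by
      simp only [phase1Body, if_pos hcond]
      rw [he]
    rw [hbody]
    have hpc : ∀ c ∈ cellsF n m, markv v' c = if c ∈ K then num else markv v c := by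
      intro c hcc
      rw [mem_cellsF] at hcc
      have hpair : ((c.1.toNat : Int), (c.2.toNat : Int)) = c := by
        rw [Prod.ext_iff]
        constructor <;> simp <;> omega
      have := hp c.1.toNat c.2.toNat
      rw [hpair] at this
      rw [markv, this, markv]
    constructor
    · refine ⟨hsf, by simp; omega, ?_, ?_, ?_⟩
      · simp only [List.length_append, List.length_singleton, hlen]
        omega
      · intro c hcc
        rw [hpc c hcc]
        by_cases hcK : c ∈ K
        · rw [if_pos hcK]; simp only; omega
        · rw [if_neg hcK]
          have := hbound c hcc
          simp only; omega
      · intro k hk1 hk2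
        simp only at hk1 hk2 ⊢
        by_cases hkn : k < num
        · obtain ⟨sk, hg, hfib, hgd⟩ := hcomp k hk1 hkn
          refine ⟨sk, hg, ?_, ?_⟩
          · intro c
            rw [← hfib c]
            constructor
            · rintro ⟨hcc, hmk⟩
              refine ⟨hcc, ?_⟩
              rw [hpc c hcc] at hmk
              by_cases hcK : c ∈ K
              · rw [if_pos hcK] at hmk; omega
              · rwa [if_neg hcK] at hmk
            · rintro ⟨hcc, hmk⟩
              refine ⟨hcc, ?_⟩
              rw [hpc c hcc]
              have hcK : c ∉ K := by
                intro hcK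
                have := hKzero c hcK
                omega
              rwa [if_neg hcK]
          · rw [← hgd]
            exact getD_append_left res _ _ _ (by rw [hlen]; omega)
        · have hkeq : k = num := by omega
          subst hkeq
          refine ⟨s, hgood_s, ?_, ?_⟩
          · intro c
            constructor
            · rintro ⟨hcc, hmk⟩
              rw [hpc c hcc] at hmk
              by_cases hcK : c ∈ K
              · exact hcK
              · rw [if_neg hcK] at hmk
                have := hbound c hcc
                omega
            · intro hcK
              refine ⟨hKc hcK, ?_⟩
              rw [hpc c (hKc hcK), if_pos hcK]
          · have : (k - 1).toNat = res.length := by omega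
            rw [this, getD_append_length]
    · intro c hcc hgc hrm
      simp only
      have hnz : markv v' c ≠ 0 := by
        rw [hpc c hcc]
        by_cases hcK : c ∈ K
        · rw [if_pos hcK]; omega
        · rw [if_neg hcK]
          rcases hrm with h | h
          · exact hprog c hcc hgc (Or.inl h)
          · by_cases hcj : c.2 < (j : Int)
            · exact hprog c hcc hgc (Or.inr ⟨h.1, hcj⟩)
            · exfalso
              apply hcK
              have hceq : c = s := by
                rw [hs, Prod.ext_iff]
                constructor <;> omega
              rw [hceq]
              exact subset_cl land n m {s} (Finset.mem_singleton_self s)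
      exact hnz
  · -- skip
    have hbody : phase1Body land i j (v, res, num) = (v, res, num) := by
      simp only [phase1Body, if_neg hcond]
    rw [hbody]
    refine ⟨hinv, ?_⟩
    intro c hcc hgc hrm
    simp only
    rcases hrm with h | h
    · exact hprog c hcc hgc (Or.inl h)
    · by_cases hcj : c.2 < (j : Int)
      · exact hprog c hcc hgc (Or.inr ⟨h.1, hcj⟩)
      · have hceq : c.1 = (i : Int) ∧ c.2 = (j : Int) := by
          constructor <;> omega
        have hoil : (land.getD c.1.toNat []).getD c.2.toNat 0 ≠ 0 := by
          simp only [goodB, decide_eq_true_eq, Bool.and_eq_true] at hgc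
          exact hgc.2
        rw [hceq.1, hceq.2] at hoil
        simp only [Int.toNat_natCast] at hoil
        have hvg : vget v i j ≠ 0 := by
          intro h0
          exact hcond ⟨hoil, h0⟩
        rw [markv, hceq.1, hceq.2]
        simp only [Int.toNat_natCast]
        exact hvg

lemma getD_replicate' {α : Type} [Inhabited α] (N : Nat) (a d : α) (k : Nat) (h : k < N) :
    (List.replicate N a).getD k d = a := by
  rw [List.getD, List.getElem?_replicate]
  simp [h]

lemma vget_replicate_zero (N M : Nat) (a b : Nat) :
    vget (List.replicate N (List.replicate M (0 : Int))) a b = 0 := by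
  rw [vget]
  rcases Nat.lt_or_ge a N with h | h
  · rw [getD_replicate' N _ _ _ h]
    rcases Nat.lt_or_ge b M with h' | h'
    · exact getD_replicate' M _ _ _ h'
    · rw [List.getD, List.getElem?_eq_none (by simpa using h')]
      rfl
  · have hout : (List.replicate N (List.replicate M (0 : Int))).getD a [] = [] := by
      rw [List.getD, List.getElem?_eq_none (by simpa using h)]
      rfl
    rw [hout]
    rfl

lemma prog_roll (land : List (List Int)) (v : List (List Int)) (i : Nat)
    (h : ProgTo land (land.length : Int) ((land.getD 0 []).length : Int) v i
      ((land.getD 0 []).length)) :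
    ProgTo land (land.length : Int) ((land.getD 0 []).length : Int) v (i + 1) 0 := by
  intro c hcc hgc hrm
  apply h c hcc hgc
  rw [mem_cellsF] at hcc
  rcases hrm with h1 | h1
  · by_cases h2 : c.1 < (i : Int)
    · exact Or.inl h2
    · right
      constructor <;> [skip; omega] <;> omega
  · omega

lemma phase1_all (land : List (List Int)) :
    P1Inv land (land.length : Int) ((land.getD 0 []).length : Int)
      ((List.range land.length).foldl (fun st i =>
        (List.range (land.getD 0 []).length).foldl (fun st j => phase1Body land i j st) st)
        (List.replicate land.length (List.replicate (land.getD 0 []).length (0 : Int)),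
          ([] : List Int), (1 : Int))) ∧
    ProgTo land (land.length : Int) ((land.getD 0 []).length : Int)
      ((List.range land.length).foldl (fun st i =>
        (List.range (land.getD 0 []).length).foldl (fun st j => phase1Body land i j st) st)
        (List.replicate land.length (List.replicate (land.getD 0 []).length (0 : Int)),
          ([] : List Int), (1 : Int))).1 land.length 0 := by
  set n : Int := (land.length : Int) with hn
  set m : Int := ((land.getD 0 []).length : Int) with hm
  have h0 : P1Inv land n m
      (List.replicate land.length (List.replicate (land.getD 0 []).length (0 : Int)),
        ([] : List Int), (1 : Int)) := by
    refine ⟨⟨by simp; omega, ?_⟩, by norm_num, by simp, ?_, ?_⟩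
    · intro k hk
      rw [getD_replicate' _ _ _ _ (by omega), List.length_replicate]
      omega
    · intro c _
      simp only [markv, vget_replicate_zero, Prod.fst, Prod.snd]
      exact ⟨le_refl 0, by norm_num⟩
    · intro k hk1 hk2
      simp only [Prod.snd] at hk2
      omega
  have main := foldl_range_inv
    (fun st i => (List.range (land.getD 0 []).length).foldl
      (fun st j => phase1Body land i j st) st)
    (fun i st => P1Inv land n m st ∧ ProgTo land n m st.1 i 0)
    land.length
    (List.replicate land.length (List.replicate (land.getD 0 []).length (0 : Int)),
      ([] : List Int), (1 : Int))
    ⟨h0, by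
      intro c hcc hgc hrm
      exfalso
      rw [mem_cellsF] at hcc
      rcases hrm with h | h <;> omega⟩
    (by
      intro i st hi hP
      have inner := foldl_range_inv (fun st j => phase1Body land i j st)
        (fun j st => P1Inv land n m st ∧ ProgTo land n m st.1 i j)
        ((land.getD 0 []).length) st hP
        (fun j st' hj hQ => phase1_step land i j st' hQ.1 hQ.2 hi hj)
      exact ⟨inner.1, prog_roll land _ i inner.2⟩)
  exact main

-- ---------- phase 2 (per-column sum of distinct component sizes) ----------
lemma mem_colSeeds (land : List (List Int)) (j : Nat) (c : Int × Int) :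
    c ∈ colSeeds land j ↔ ∃ r < land.length,
      (land.getD r []).getD j 0 ≠ 0 ∧ c = ((r : Int), (j : Int)) := by
  simp only [colSeeds, Finset.mem_image, Finset.mem_filter, Finset.mem_range]
  constructor
  · rintro ⟨r, ⟨hr, hoil⟩, rfl⟩
    exact ⟨r, hr, hoil, rfl⟩
  · rintro ⟨r, hr, hoil, rfl⟩
    exact ⟨r, ⟨hr, hoil⟩, rfl⟩

lemma colSeeds_subset_cells (land : List (List Int)) (j : Nat)
    (hj : j < (land.getD 0 []).length) :
    colSeeds land j ⊆ cellsF (land.length : Int) ((land.getD 0 []).length : Int) := by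
  intro c hc
  obtain ⟨r, hr, -, rfl⟩ := (mem_colSeeds land j c).1 hc
  rw [mem_cellsF]
  refine ⟨by omega, by omega, by omega, by omega⟩

lemma column_value (land : List (List Int))
    (v : List (List Int)) (res : List Int) (num : Int)
    (hinv : P1Inv land (land.length : Int) ((land.getD 0 []).length : Int) (v, res, num))
    (hmarked : ∀ c ∈ cellsF (land.length : Int) ((land.getD 0 []).length : Int),
      goodB land (land.length : Int) ((land.getD 0 []).length : Int) c = true → markv v c ≠ 0)
    (jj : Nat) (hj : jj < (land.getD 0 []).length) :
    ((List.range land.length).foldl (fun tmp r =>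
        if vget v r jj ≠ 0 ∧ ¬ vget v r jj ∈ tmp then tmp ++ [vget v r jj] else tmp)
      ([] : List Int)).foldl (fun a t => a + res.getD (t - 1).toNat 0) 0
    = ((ClB land (land.length : Int) ((land.getD 0 []).length : Int)
        (colSeeds land jj)).card : Int) := by
  set n : Int := (land.length : Int) with hn
  set m : Int := ((land.getD 0 []).length : Int) with hm
  obtain ⟨hsh, hnum1, hlen, hbound, hcomp⟩ := hinv
  simp only at hsh hnum1 hlen hbound hcomp
  -- characterize the tmp list built by the scan of column jj
  have htmp := foldl_range_inv (fun tmp r =>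
      if vget v r jj ≠ 0 ∧ ¬ vget v r jj ∈ tmp then tmp ++ [vget v r jj] else tmp)
    (fun r tmp => tmp.Nodup ∧ ∀ t : Int, t ∈ tmp ↔ t ≠ 0 ∧ ∃ r' < r, vget v r' jj = t)
    land.length ([] : List Int)
    (by
      refine ⟨List.nodup_nil, ?_⟩
      intro t
      simp)
    (by
      intro r tmp hr ⟨hnd, hch⟩
      dsimp only
      by_cases hx : vget v r jj ≠ 0 ∧ ¬ vget v r jj ∈ tmp
      · rw [if_pos hx]
        refine ⟨?_, ?_⟩
        · simp [List.nodup_append, hnd]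
          exact fun a ha heq => hx.2 (heq ▸ ha)
        · intro t
          rw [List.mem_append, hch t]
          simp only [List.mem_singleton]
          constructor
          · rintro (⟨ht, r', hr', hv⟩ | rfl)
            · exact ⟨ht, r', by omega, hv⟩
            · exact ⟨hx.1, r, by omega, rfl⟩
          · rintro ⟨ht, r', hr', hv⟩
            by_cases hrr : r' = r
            · subst hrr
              exact Or.inr hv.symm
            · exact Or.inl ⟨ht, r', by omega, hv⟩
      · rw [if_neg hx]
        refine ⟨hnd, ?_⟩
        intro t
        rw [hch t]
        constructor
        · rintro ⟨ht, r', hr', hv⟩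
          exact ⟨ht, r', by omega, hv⟩
        · rintro ⟨ht, r', hr', hv⟩
          by_cases hrr : r' = r
          · subst hrr
            refine ⟨ht, ?_⟩
            rcases not_and_or.1 hx with h | h
            · exact absurd ht (by simpa [hv] using h)
            · have : vget v r' jj ∈ tmp := not_not.1 h
              rw [hv] at this
              obtain ⟨-, r'', hr'', hv''⟩ := (hch t).1 (hv ▸ this)
              exact ⟨r'', hr'', hv''⟩
          · exact ⟨ht, r', by omega, hv⟩
    )
  set tmp : List Int := (List.range land.length).foldl (fun tmp r =>
      if vget v r jj ≠ 0 ∧ ¬ vget v r jj ∈ tmp then tmp ++ [vget v r jj] else tmp)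
    ([] : List Int) with htmpdef
  obtain ⟨hnd, hch⟩ := htmp
  set T : Finset Int := tmp.toFinset with hT
  set fib : Int → Finset (Int × Int) :=
    fun t => (cellsF n m).filter (fun c => markv v c = t) with hfib
  -- each label in T names a component whose size is recorded in res
  have hlab : ∀ t ∈ T, (1 ≤ t ∧ t < num) ∧
      res.getD (t - 1).toNat 0 = ((fib t).card : Int) ∧
      ∃ st, goodB land n m st = true ∧ fib t = ClB land n m {st} := by
    intro t htT
    obtain ⟨ht0, r, hr, hv⟩ := (hch t).1 (List.mem_toFinset.1 htT)
    have hp : ((r : Int), (jj : Int)) ∈ cellsF n m := by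
      rw [mem_cellsF]
      refine ⟨by omega, by omega, by omega, by omega⟩
    have hmk : markv v ((r : Int), (jj : Int)) = t := by rw [markv_cast]; exact hv
    have hb := hbound _ hp
    rw [hmk] at hb
    obtain ⟨st, hg, hfibiff, hgd⟩ := hcomp t (by omega) hb.2
    have hfe : fib t = ClB land n m {st} := by
      ext c
      rw [hfib]
      simp only [Finset.mem_filter]
      exact hfibiff c
    exact ⟨⟨by omega, hb.2⟩, by rw [hgd, hfe], st, hg, hfe⟩
  -- the fibers of distinct labels are disjoint and cover the closure of the column seeds
  have hdisj : ∀ x ∈ T, ∀ y ∈ T, x ≠ y → Disjoint (fib x) (fib y) := by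
    intro x _ y _ hxy
    rw [Finset.disjoint_left]
    intro c hcx hcy
    rw [hfib] at hcx hcy
    simp only [Finset.mem_filter] at hcx hcy
    exact hxy (hcx.2 ▸ hcy.2)
  have hcover : T.biUnion fib = ClB land n m (colSeeds land jj) := by
    have hcs : colSeeds land jj ⊆ cellsF n m := colSeeds_subset_cells land jj hj
    apply Finset.Subset.antisymm
    · intro c hc
      obtain ⟨t, htT, hcfib⟩ := Finset.mem_biUnion.1 hc
      obtain ⟨-, -, st, hg, hfe⟩ := hlab t htT
      obtain ⟨ht0, r, hr, hv⟩ := (hch t).1 (List.mem_toFinset.1 htT)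
      have hpfib : ((r : Int), (jj : Int)) ∈ fib t := by
        rw [hfib]
        refine Finset.mem_filter.2 ⟨?_, by rw [markv_cast]; exact hv⟩
        rw [mem_cellsF]
        refine ⟨by simp, by simp; omega, by simp, by simp; omega⟩
      have hpcl : ((r : Int), (jj : Int)) ∈ ClB land n m {st} := by rw [← hfe]; exact hpfib
      have hgp : goodB land n m ((r : Int), (jj : Int)) = true :=
        cl_subset_good (by simp [hg]) _ hpcl
      have hpcol : ((r : Int), (jj : Int)) ∈ colSeeds land jj := by
        rw [mem_colSeeds]
        refine ⟨r, hr, ?_, rfl⟩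
        simp only [goodB, decide_eq_true_eq, Bool.and_eq_true] at hgp
        simpa using hgp.2
      have hpe : ClB land n m {((r : Int), (jj : Int))} = ClB land n m {st} :=
        cl_singleton_eq hg hpcl
      have hsub : ClB land n m {((r : Int), (jj : Int))} ⊆ ClB land n m (colSeeds land jj) :=
        cl_min (Finset.singleton_subset_iff.2
          (subset_cl land n m (colSeeds land jj) hpcol)) (cl_closed' hcs)
      rw [hfe, ← hpe] at hcfib
      exact hsub hcfib
    · apply cl_min
      · intro c hc
        obtain ⟨r, hr, hoil, rfl⟩ := (mem_colSeeds land jj c).1 hc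
        have hcc : ((r : Int), (jj : Int)) ∈ cellsF n m := by
          rw [mem_cellsF]
          refine ⟨by omega, by omega, by omega, by omega⟩
        have hg : goodB land n m ((r : Int), (jj : Int)) = true := by
          simp only [goodB, decide_eq_true_eq, Bool.and_eq_true]
          exact ⟨⟨by omega, by omega, by omega, by omega⟩, by simpa using hoil⟩
        have hnz := hmarked _ hcc hg
        refine Finset.mem_biUnion.2 ⟨markv v ((r : Int), (jj : Int)), ?_, ?_⟩
        · apply List.mem_toFinset.2
          apply (hch _).2
          exact ⟨hnz, r, hr, by rw [← markv_cast]⟩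
        · rw [hfib]
          exact Finset.mem_filter.2 ⟨hcc, rfl⟩
      · intro c hc d hd hg
        obtain ⟨t, htT, hcfib⟩ := Finset.mem_biUnion.1 hc
        obtain ⟨-, -, st, hgst, hfe⟩ := hlab t htT
        have hclosed : ClosedB land n m (ClB land n m {st}) :=
          cl_closed' (Finset.singleton_subset_iff.2 (good_mem_cells hgst))
        refine Finset.mem_biUnion.2 ⟨t, htT, ?_⟩
        rw [hfe] at hcfib ⊢
        exact hclosed c hcfib d hd hg
  -- turn the left-hand fold into the sum over T
  rw [PySem.List.foldl_add tmp (fun t => res.getD (t - 1).toNat 0) 0]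
  rw [← List.sum_toFinset _ hnd]
  rw [← hT]
  have hsum : ∑ t ∈ T, res.getD (t - 1).toNat 0 = ∑ t ∈ T, ((fib t).card : Int) := by
    apply Finset.sum_congr rfl
    intro t htT
    exact (hlab t htT).2.1
  rw [hsum]
  rw [← Nat.cast_sum]
  rw [← Finset.card_biUnion hdisj, hcover]
  simp
theorem solution_spec_aux : ∀ (land : List (List Int)), solution land = solution_alt land := by
  intro land
  obtain ⟨hinv, hprog⟩ := phase1_all land
  have hmarked : ∀ c ∈ cellsF (land.length : Int) ((land.getD 0 []).length : Int),
      goodB land (land.length : Int) ((land.getD 0 []).length : Int) c = true →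
      markv ((List.range land.length).foldl (fun st i =>
      (List.range (land.getD 0 []).length).foldl (fun st j => phase1Body land i j st) st)
      (List.replicate land.length (List.replicate (land.getD 0 []).length (0 : Int)),
        ([] : List Int), (1 : Int))).1 c ≠ 0 := by
    intro c hcc hgc
    apply hprog c hcc hgc
    rw [mem_cellsF] at hcc
    exact Or.inl (by omega)
  have e1 : solution land = (List.range (land.getD 0 []).length).foldl (fun ans i =>
      max ans (((List.range land.length).foldl (fun tmp j =>
        if vget ((List.range land.length).foldl (fun st i =>
      (List.range (land.getD 0 []).length).foldl (fun st j => phase1Body land i j st) st)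
      (List.replicate land.length (List.replicate (land.getD 0 []).length (0 : Int)),
        ([] : List Int), (1 : Int))).1 j i ≠ 0 ∧ ¬ vget ((List.range land.length).foldl (fun st i =>
      (List.range (land.getD 0 []).length).foldl (fun st j => phase1Body land i j st) st)
      (List.replicate land.length (List.replicate (land.getD 0 []).length (0 : Int)),
        ([] : List Int), (1 : Int))).1 j i ∈ tmp then
          tmp ++ [vget ((List.range land.length).foldl (fun st i =>
      (List.range (land.getD 0 []).length).foldl (fun st j => phase1Body land i j st) st)
      (List.replicate land.length (List.replicate (land.getD 0 []).length (0 : Int)),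
        ([] : List Int), (1 : Int))).1 j i] else tmp)
        ([] : List Int)).foldl (fun a t => a + ((List.range land.length).foldl (fun st i =>
      (List.range (land.getD 0 []).length).foldl (fun st j => phase1Body land i j st) st)
      (List.replicate land.length (List.replicate (land.getD 0 []).length (0 : Int)),
        ([] : List Int), (1 : Int))).2.1.getD (t - 1).toNat 0) 0)) 0 := rfl
  have e2 : solution_alt land = (List.range (land.getD 0 []).length).foldl (fun best j =>
      max best ((floop land (land.length : Int) ((land.getD 0 []).length : Int)
        (land.length * (land.getD 0 []).length + 2)
        (colSeeds land j) (colSeeds land j)).card : Int)) 0 := rfl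
  rw [e1, e2]
  apply PySem.List.foldl_congr_mem
  intro acc jj hjj
  have hj : jj < (land.getD 0 []).length := List.mem_range.1 hjj
  have hcol := column_value land ((List.range land.length).foldl (fun st i =>
      (List.range (land.getD 0 []).length).foldl (fun st j => phase1Body land i j st) st)
      (List.replicate land.length (List.replicate (land.getD 0 []).length (0 : Int)),
        ([] : List Int), (1 : Int))).1 ((List.range land.length).foldl (fun st i =>
      (List.range (land.getD 0 []).length).foldl (fun st j => phase1Body land i j st) st)
      (List.replicate land.length (List.replicate (land.getD 0 []).length (0 : Int)),
        ([] : List Int), (1 : Int))).2.1 ((List.range land.length).foldl (fun st i =>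
      (List.range (land.getD 0 []).length).foldl (fun st j => phase1Body land i j st) st)
      (List.replicate land.length (List.replicate (land.getD 0 []).length (0 : Int)),
        ([] : List Int), (1 : Int))).2.2 hinv hmarked jj hj
  rw [hcol]
  have hcs : colSeeds land jj ⊆ cellsF (land.length : Int) ((land.getD 0 []).length : Int) :=
    colSeeds_subset_cells land jj hj
  have hfuel : (ClB land (land.length : Int) ((land.getD 0 []).length : Int)
      (colSeeds land jj) \ colSeeds land jj).card + 2 ≤
      land.length * (land.getD 0 []).length + 2 := by
    have h1 : (ClB land (land.length : Int) ((land.getD 0 []).length : Int)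
        (colSeeds land jj) \ colSeeds land jj).card ≤
        (ClB land (land.length : Int) ((land.getD 0 []).length : Int)
          (colSeeds land jj)).card :=
      Finset.card_le_card Finset.sdiff_subset
    have h2 := Finset.card_le_card (iter_subset_cells (land := land) hcs
      (((land.length : Int)).toNat * (((land.getD 0 []).length : Int)).toNat))
    rw [card_cellsF] at h2
    have h3 : ((land.length : Int)).toNat * (((land.getD 0 []).length : Int)).toNat =
        land.length * (land.getD 0 []).length := by simp
    have h4 : (ClB land (land.length : Int) ((land.getD 0 []).length : Int)
        (colSeeds land jj)).card ≤
        ((land.length : Int)).toNat * (((land.getD 0 []).length : Int)).toNat := h2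
    omega
  rw [floop_spec land (land.length : Int) ((land.getD 0 []).length : Int)
    (colSeeds land jj) hcs (land.length * (land.getD 0 []).length + 2)
    (colSeeds land jj) (colSeeds land jj) (Finset.Subset.refl _) (Finset.Subset.refl _)
    (subset_cl land (land.length : Int) ((land.getD 0 []).length : Int) (colSeeds land jj))
    (fun c hc hcn => absurd hc hcn) hfuel]

-- ===== VERDICT (by name: the statement is the Claim_ definition above) =====
theorem solution_spec : Claim_equal_solution := by
  intro land _ _
  unfold Spec_solution
  exact solution_spec_aux land
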